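-- pv_equiv track=rewrite | github.com/Cho-El/Python-coding-test-practice | 라인 코테/4.py | solution
-- ===== SOURCE A (Python) =====
-- def solution(arr,brr):
-- 	cnt = 0
-- 	for i in range(len(arr)-1):
-- 		if arr[i] != brr[i]:
-- 			dif = brr[i] - arr[i]
-- 			arr[i] += dif
-- 			arr[i+1] -= dif
-- 			cnt += 1
-- 	return cnt
--
-- arr = [3,7,2,4]
--
-- brr = [4,5,5,2]
-- ===== SOURCE B (Python) =====
-- def solution(arr, brr):
--     # Prefix-sum view: A's count equals the number of nonzero running sums of
--     # (arr[i] - brr[i]) over i = 0..len(arr)-2. Return-value equivalence only: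
--     # unlike A, this does not mutate arr.
--     cnt = 0
--     s = 0
--     for x, y in zip(arr[:-1], brr):
--         s += x - y
--         if s != 0:
--             cnt += 1
--     return cnt
-- ===== Notes on version B (the rewrite author's own statement) =====
-- stated objective: simpler
-- what changed: Replaces A's in-place difference propagation through the array with a single running prefix-sum scalar: the count equals the number of nonzero prefix sums of arr[i]-brr[i]; no array writes at all.
import Mathlib
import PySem

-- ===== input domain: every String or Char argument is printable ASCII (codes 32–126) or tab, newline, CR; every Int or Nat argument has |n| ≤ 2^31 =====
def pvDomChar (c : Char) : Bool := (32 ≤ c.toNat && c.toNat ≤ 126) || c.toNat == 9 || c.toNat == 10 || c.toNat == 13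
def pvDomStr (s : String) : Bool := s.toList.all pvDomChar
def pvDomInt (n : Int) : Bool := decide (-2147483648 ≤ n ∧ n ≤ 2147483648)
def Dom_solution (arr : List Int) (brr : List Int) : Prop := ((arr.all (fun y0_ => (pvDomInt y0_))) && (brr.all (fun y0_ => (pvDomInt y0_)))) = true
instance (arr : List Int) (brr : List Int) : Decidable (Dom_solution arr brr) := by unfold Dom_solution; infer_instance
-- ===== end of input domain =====

-- B replaces A's in-place difference propagation by a running prefix-sum scalar
-- (objective: simpler; no array writes). A mutates arr in place; the equivalence
-- proved here is about the RETURN value only.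

-- ===== PORT A =====
-- for i in range(len(arr)-1): body; k = remaining iterations, i = current index,
-- a = the mutated list, cnt = the counter.  arr[i] / brr[i] are in range on every
-- input admitted by Pre_solution, so getD is exact there.
def solutionLoopA (brr : List Int) : Nat → Nat → List Int → Int → Int
  | 0, _, _, cnt => cnt
  | k + 1, i, a, cnt =>
    let ai := a.getD i 0
    let bi := brr.getD i 0
    if ai ≠ bi then
      let dif := bi - ai
      let a1 := a.set i (ai + dif)                       -- arr[i] += dif
      let a2 := a1.set (i + 1) (a1.getD (i + 1) 0 - dif) -- arr[i+1] -= dif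
      solutionLoopA brr k (i + 1) a2 (cnt + 1)
    else
      solutionLoopA brr k (i + 1) a cnt

def solution (arr : List Int) (brr : List Int) : Int :=
  solutionLoopA brr (arr.length - 1) 0 arr 0

-- ===== PORT B =====
-- for (x,y) in zip(arr[:-1], brr): s += x - y; if s != 0: cnt += 1
def solutionLoopB : List (Int × Int) → Int → Int → Int
  | [], _, cnt => cnt
  | (x, y) :: rest, s, cnt =>
    let s' := s + (x - y)
    solutionLoopB rest s' (if s' ≠ 0 then cnt + 1 else cnt)

def solution_alt (arr : List Int) (brr : List Int) : Int :=
  solutionLoopB (List.zip arr.dropLast brr) 0 0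

-- ===== PRECONDITION & SPEC =====
-- A raises IndexError reading brr[i] when len(brr) < len(arr)-1; exactly those inputs are excluded.
def Pre_solution (arr : List Int) (brr : List Int) : Prop := arr.length ≤ brr.length + 1
instance (arr : List Int) (brr : List Int) : Decidable (Pre_solution arr brr) := by unfold Pre_solution; infer_instance
def pvWitness_solution : List Int × List Int := ([3, 7, 2, 4], [4, 5, 5, 2])

def Spec_solution (arr : List Int) (brr : List Int) (out : Int) : Prop := out = solution_alt arr brr
instance (arr : List Int) (brr : List Int) (out : Int) : Decidable (Spec_solution arr brr out) := by unfold Spec_solution; infer_instance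

-- ===== CLAIM (what is proved, stated in full; the proofs are below) =====
def Claim_equal_solution : Prop := ∀ (arr : List Int) (brr : List Int), Dom_solution arr brr → Pre_solution arr brr → Spec_solution arr brr (solution arr brr)

-- ===== LEMMAS AND PROOFS =====

-- dropping past a set position ignores the set
theorem pvDropSet (l : List Int) (n m : Nat) (v : Int) (h : n < m) :
    (l.set n v).drop m = l.drop m := by
  apply List.ext_getElem
  · simp
  · intro j h1 h2
    simp only [List.getElem_drop, List.getElem_set]
    rw [if_neg (by omega)]

-- main invariant: a run of A's loop from index i with k iterations left equals
-- B's loop over the pairs (a[i+j], brr[i+j]) (j < k) starting with carry 0.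
theorem loopA_eq_loopB (brr : List Int) :
    ∀ (k i : Nat) (a : List Int) (cnt : Int),
      i + k + 1 ≤ a.length → i + k ≤ brr.length →
      solutionLoopA brr k i a cnt
        = solutionLoopB (List.zip ((a.drop i).take k) ((brr.drop i).take k)) 0 cnt := by
  intro k
  induction k with
  | zero => intro i a cnt _ _; simp [solutionLoopA, solutionLoopB]
  | succ k ih =>
    intro i a cnt hlen hblen
    have hia : i < a.length := by omega
    have hi1a : i + 1 < a.length := by omega
    have hib : i < brr.length := by omega
    have hadrop : a.drop i = a[i] :: a.drop (i + 1) := List.drop_eq_getElem_cons hia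
    have hbdrop : brr.drop i = brr[i] :: brr.drop (i + 1) := List.drop_eq_getElem_cons hib
    have hgetA : a.getD i 0 = a[i] := List.getD_eq_getElem a 0 hia
    have hgetB : brr.getD i 0 = brr.getD i 0 := rfl
    have hgetB' : brr.getD i 0 = brr[i] := List.getD_eq_getElem brr 0 hib
    rw [solutionLoopA]
    by_cases h : a.getD i 0 = brr.getD i 0
    · -- no adjustment: carry stays 0
      simp only [h, ne_eq, not_true_eq_false, ite_false]
      rw [ih (i + 1) a cnt (by omega) (by omega)]
      rw [hadrop, hbdrop]
      rw [hgetA, hgetB'] at h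
      rw [List.take_succ_cons, List.take_succ_cons, List.zip_cons_cons]
      simp only [solutionLoopB, h, sub_self, add_zero, ne_eq, not_true_eq_false, if_false]
    · -- adjustment: carry becomes a[i] - brr[i] ≠ 0, pushed into a[i+1]
      simp only [ne_eq, h, not_false_eq_true, ite_true]
      rw [hgetA, hgetB'] at h ⊢
      have hget1 : ((a.set i (a[i] + (brr[i] - a[i]))).getD (i + 1) 0) = a[i + 1] := by
        rw [List.getD_eq_getElem _ 0 (by simpa using hi1a)]
        simp
      rw [hget1]
      set a2 := (a.set i (a[i] + (brr[i] - a[i]))).set (i + 1) (a[i + 1] - (brr[i] - a[i])) with ha2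
      have ha2len : a2.length = a.length := by simp [ha2]
      rw [ih (i + 1) a2 (cnt + 1) (by omega) (by omega)]
      have hdrop2 : a2.drop (i + 1) = (a[i + 1] - (brr[i] - a[i])) :: a.drop (i + 2) := by
        have h2 : i + 1 < a2.length := by omega
        rw [List.drop_eq_getElem_cons h2]
        have hhead : a2[i + 1] = a[i + 1] - (brr[i] - a[i]) := by
          simp [ha2]
        have htail : a2.drop (i + 2) = a.drop (i + 2) := by
          rw [ha2, pvDropSet _ _ _ _ (by omega), pvDropSet _ _ _ _ (by omega)]
        rw [hhead, htail]
      rw [hdrop2, hadrop, hbdrop]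
      -- split on whether further pairs remain
      cases k with
      | zero =>
        rw [List.take_succ_cons, List.take_succ_cons, List.zip_cons_cons]
        simp [solutionLoopB, sub_ne_zero.mpr h]
      | succ k' =>
        have hi2a : i + 2 ≤ a.length := by omega
        have hi1b : i + 1 < brr.length := by omega
        have hadrop1 : a.drop (i + 1) = a[i + 1] :: a.drop (i + 2) :=
          List.drop_eq_getElem_cons (by omega : i + 1 < a.length)
        have hbdrop1' : brr.drop (i + 1) = brr[i + 1] :: brr.drop (i + 2) :=
          List.drop_eq_getElem_cons hi1b
        rw [hadrop1, hbdrop1']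
        simp only [List.take_succ_cons, List.zip_cons_cons]
        -- unfold one step of B's loop on each side; the carries agree up to ring
        simp only [solutionLoopB, zero_add, sub_ne_zero.mpr h, ne_eq, not_false_eq_true,
          ite_true]
        ring_nf

-- zip truncates to the shorter list
theorem pvZipTake (l l' : List Int) (n : Nat) (h : l.length ≤ n) :
    List.zip l (l'.take n) = List.zip l l' := by
  induction l generalizing l' n with
  | nil => simp
  | cons x xs ih =>
    cases l' with
    | nil => simp
    | cons y ys =>
      cases n with
      | zero => simp at h
      | succ m =>
        simp only [List.take_succ_cons, List.zip_cons_cons]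
        rw [ih ys m (by simp at h; omega)]

-- ===== VERDICT (by name: the statement is the Claim_ definition above) =====
theorem solution_spec : Claim_equal_solution := by
  intro arr brr _ hpre
  unfold Spec_solution solution solution_alt
  unfold Pre_solution at hpre
  cases arr with
  | nil => simp [solutionLoopA, solutionLoopB, List.zip]
  | cons x xs =>
    have hlen : (x :: xs).length = xs.length + 1 := by simp
    have h := loopA_eq_loopB brr ((x :: xs).length - 1) 0 (x :: xs) 0
      (by omega) (by omega)
    rw [h]
    simp only [List.drop_zero]
    rw [List.dropLast_eq_take,
      ← pvZipTake (List.take ((x :: xs).length - 1) (x :: xs)) brr ((x :: xs).length - 1)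
        (by simp)]
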